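-- pv_equiv track=rewrite | github.com/funcdfs/FRPC | docs/archive/verify_docs.py | extract_doc_block
-- ===== SOURCE A (Python) =====
-- from typing import List, Tuple, Set
--
-- def extract_doc_block(lines: List[str], end_line: int) -> str:
--     """Extract the documentation block ending at end_line."""
--     doc_lines = []
--     i = end_line
--
--     while i >= 0:
--         line = lines[i]
--         doc_lines.insert(0, line)
--         if '/**' in line:
--             break
--         i -= 1
--
--     return '\n'.join(doc_lines)
-- ===== SOURCE B (Python) =====
-- def extract_doc_block(lines, end_line):
--     """Extract the documentation block ending at end_line.
--
--     Forward decomposition: one prefix pass records the position of the last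
--     '/**' marker at or before end_line (defaulting to 0), then a second pass
--     collects lines[start..end_line]."""
--     start = 0
--     for i in range(end_line + 1):
--         if '/**' in lines[i]:
--             start = i
--     out = []
--     for j in range(start, end_line + 1):
--         out.append(lines[j])
--     return '\n'.join(out)
-- ===== Notes on version B (the rewrite author's own statement) =====
-- stated objective: faster
-- what changed: Replaces A's backward scan that builds the block with doc_lines.insert(0, line) (quadratic list shifting) by two forward passes: a prefix scan recording the last '/**' marker position, then a direct forward reconstruction of lines[start..end_line] with O(1) appends.
import Mathlib
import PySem

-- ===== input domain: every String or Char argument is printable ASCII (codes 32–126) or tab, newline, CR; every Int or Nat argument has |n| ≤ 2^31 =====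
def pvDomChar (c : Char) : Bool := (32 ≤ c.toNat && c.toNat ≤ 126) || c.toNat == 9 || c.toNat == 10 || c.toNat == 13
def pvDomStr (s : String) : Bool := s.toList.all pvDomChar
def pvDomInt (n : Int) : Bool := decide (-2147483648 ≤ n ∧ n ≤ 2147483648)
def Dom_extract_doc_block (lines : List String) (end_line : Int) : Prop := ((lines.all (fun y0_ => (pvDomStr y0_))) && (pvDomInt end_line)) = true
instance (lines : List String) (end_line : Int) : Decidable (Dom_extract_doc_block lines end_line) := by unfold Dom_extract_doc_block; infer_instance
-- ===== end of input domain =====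

-- B replaces A's backward scan with insert(0) by two forward passes (marker-prefix scan, then reconstruction); return values proved equal on Pre_.

-- ===== PORT A =====
-- the 'while i >= 0' loop, structurally recursing on the (in-range, so Nat) index i;
-- doc_lines.insert(0, line) is 'line :: doc'; lines[i] is getD (Pre_ keeps every accessed index in range)
def extractLoopA (lines : List String) : Nat → List String → List String
  | 0, doc => lines.getD 0 "" :: doc
  | (i+1), doc =>
      let line := lines.getD (i+1) ""
      if PySem.Str.isIn "/**" line then line :: doc
      else extractLoopA lines i (line :: doc)

def extract_doc_block (lines : List String) (end_line : Int) : String :=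
  if end_line < 0 then PySem.Str.join "\n" []
  else PySem.Str.join "\n" (extractLoopA lines end_line.toNat [])

-- ===== PORT B =====
-- first forward loop: for i in range(end_line+1): if '/**' in lines[i]: start = i
def extractStartB (lines : List String) (n : Nat) : Nat :=
  (List.range n).foldl (fun start i => if PySem.Str.isIn "/**" (lines.getD i "") then i else start) 0

-- second forward loop: for j in range(start, end_line+1): out.append(lines[j])
def extract_doc_block_alt (lines : List String) (end_line : Int) : String :=
  let n := (end_line + 1).toNat
  let start := extractStartB lines n
  let out := (List.range' start (n - start)).foldl (fun out j => out ++ [lines.getD j ""]) []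
  PySem.Str.join "\n" out

-- ===== PRECONDITION & SPEC =====
-- Python A raises IndexError iff 0 ≤ end_line and end_line is not a valid index of lines; exactly those inputs are excluded.
def Pre_extract_doc_block (lines : List String) (end_line : Int) : Prop := end_line < (lines.length : Int)
instance (lines : List String) (end_line : Int) : Decidable (Pre_extract_doc_block lines end_line) := by unfold Pre_extract_doc_block; infer_instance

def pvWitness_extract_doc_block : List String × Int := (["/** doc", " * text */"], 1)

def Spec_extract_doc_block (lines : List String) (end_line : Int) (out : String) : Prop := out = extract_doc_block_alt lines end_line
instance (lines : List String) (end_line : Int) (out : String) : Decidable (Spec_extract_doc_block lines end_line out) := by unfold Spec_extract_doc_block; infer_instance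

-- ===== CLAIM (what is proved, stated in full; the proofs are below) =====
def Claim_equal_extract_doc_block : Prop := ∀ (lines : List String) (end_line : Int), Dom_extract_doc_block lines end_line → Pre_extract_doc_block lines end_line → Spec_extract_doc_block lines end_line (extract_doc_block lines end_line)

-- ===== LEMMAS AND PROOFS =====

-- recurrence of B's marker scan
theorem extractStartB_succ (lines : List String) (i : Nat) :
    extractStartB lines (i+1) =
      if PySem.Str.isIn "/**" (lines.getD i "") then i else extractStartB lines i := by
  unfold extractStartB
  rw [List.range_succ, List.foldl_append]
  simp

theorem extractStartB_le (lines : List String) (i : Nat) : extractStartB lines (i+1) ≤ i := by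
  induction i with
  | zero => rw [extractStartB_succ]; split <;> simp [extractStartB]
  | succ i ih => rw [extractStartB_succ]; split <;> omega

-- A's backward loop builds exactly the segment from B's start position to i
theorem extractLoopA_eq (lines : List String) (i : Nat) (doc : List String) :
    extractLoopA lines i doc =
      (List.range' (extractStartB lines (i+1)) (i + 1 - extractStartB lines (i+1))).map
        (fun j => lines.getD j "") ++ doc := by
  induction i generalizing doc with
  | zero =>
    rw [extractStartB_succ]
    by_cases h : PySem.Str.isIn "/**" (lines.getD 0 "") = true <;>
      simp [extractLoopA, extractStartB]
  | succ i ih =>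
    rw [extractStartB_succ]
    by_cases h : PySem.Str.isIn "/**" (lines.getD (i+1) "") = true
    · have hk : i + 1 + 1 - (i + 1) = 1 := by omega
      simp only [extractLoopA]
      rw [h]
      simp [hk]
    · have hle := extractStartB_le lines i
      have h1 : i + 1 + 1 - extractStartB lines (i+1) = (i + 1 - extractStartB lines (i+1)) + 1 := by
        omega
      have h2 : extractStartB lines (i+1) + 1 * (i + 1 - extractStartB lines (i+1)) = i + 1 := by
        omega
      simp only [extractLoopA]
      rw [if_neg h, if_neg h, ih, h1, List.range'_concat, h2]
      simp

-- B's second loop (append accumulation) is the map over the index range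
theorem foldl_append_eq_map (f : Nat → String) (r : List Nat) (acc : List String) :
    r.foldl (fun out j => out ++ [f j]) acc = acc ++ r.map f := by
  induction r generalizing acc with
  | nil => simp
  | cons x xs ih => simp [List.foldl_cons, ih]

-- ===== VERDICT (by name: the statement is the Claim_ definition above) =====
theorem extract_doc_block_spec : Claim_equal_extract_doc_block := by
  intro lines end_line _ _
  unfold Spec_extract_doc_block extract_doc_block extract_doc_block_alt
  by_cases hneg : end_line < 0
  · have hn : (end_line + 1).toNat = 0 := by omega
    simp [hneg, hn, extractStartB]
  · have hn : (end_line + 1).toNat = end_line.toNat + 1 := by omega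
    simp only [hneg, if_false, hn]
    rw [extractLoopA_eq, foldl_append_eq_map]
    simp
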